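-- pv_equiv track=rewrite | github.com/pypi-data/pypi-mirror-374 | packages/kagebunshin/kagebunshin-0.1.6.tar.gz/kagebunshin-0.1.6/kagebunshin/utils/formatting.py | format_text_context
-- ===== SOURCE A (Python) =====
-- def format_text_context(markdown_content: str) -> str:
--     """Format markdown text into a human-readable context string with deduplication."""
--     if not markdown_content:
--         return "Page Content (Markdown):\n\n"
--
--     # Remove excessive whitespace and normalize line breaks
--     cleaned_content = markdown_content.strip()
--
--     # Remove duplicate consecutive lines
--     lines = cleaned_content.split('\n')
--     deduplicated_lines = []
--     prev_line = None
--
--     for line in lines: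
--         line = line.strip()
--         # Skip if same as previous line (avoid exact duplicates)
--         if line != prev_line or not line:
--             deduplicated_lines.append(line)
--         prev_line = line
--
--     # Remove excessive empty lines (max 2 consecutive empty lines)
--     final_lines = []
--     empty_count = 0
--     for line in deduplicated_lines:
--         if not line.strip():
--             empty_count += 1
--             if empty_count <= 2:
--                 final_lines.append(line)
--         else:
--             empty_count = 0
--             final_lines.append(line)
--
--     cleaned_content = '\n'.join(final_lines).strip()
--     return f"Page Content (Markdown):\n\n{cleaned_content}"
-- ===== SOURCE B (Python) =====
-- def format_text_context(markdown_content: str) -> str: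
--     """Format markdown text into a human-readable context string with deduplication."""
--     if not markdown_content:
--         return "Page Content (Markdown):\n\n"
--     out = []
--     prev = None
--     empty = 0
--     # single pass: dedup consecutive non-empty lines and cap runs of empty lines at 2
--     for raw in markdown_content.strip().split('\n'):
--         line = raw.strip()
--         if not line:
--             empty += 1
--             if empty <= 2:
--                 out.append(line)
--         elif line != prev:
--             out.append(line)
--             empty = 0
--         prev = line
--     return "Page Content (Markdown):\n\n" + '\n'.join(out).strip()
-- ===== Notes on version B (the rewrite author's own statement) =====
-- stated objective: simpler
-- what changed: Replaces A's two sequential passes (build a deduplicated intermediate list, then re-scan it to cap empty-line runs) with one fused loop that maintains prev-line and empty-count together and never materialises the intermediate list.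
import Mathlib
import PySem

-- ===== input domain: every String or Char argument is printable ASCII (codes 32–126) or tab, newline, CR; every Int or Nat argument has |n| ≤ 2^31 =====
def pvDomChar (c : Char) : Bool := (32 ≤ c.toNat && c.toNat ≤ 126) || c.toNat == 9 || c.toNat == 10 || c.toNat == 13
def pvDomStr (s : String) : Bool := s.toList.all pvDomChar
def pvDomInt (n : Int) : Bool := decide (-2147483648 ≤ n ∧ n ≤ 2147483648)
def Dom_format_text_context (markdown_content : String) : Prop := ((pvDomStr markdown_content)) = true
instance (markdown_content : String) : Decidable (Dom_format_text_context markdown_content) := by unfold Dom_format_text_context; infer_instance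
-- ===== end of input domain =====

-- B fuses A's two passes (dedup, then cap empty runs) into one loop; objective: simpler.

-- ===== PORT A =====
def format_text_context (markdown_content : String) : String :=
  if markdown_content = "" then "Page Content (Markdown):\n\n"
  else
    let cleaned := PySem.Str.strip markdown_content
    let lines : List String := (PySem.Chars.splitOn cleaned.toList ['\n']).map String.ofList
    let p1 := lines.foldl (fun (st : List String × Option String) rawLine =>
        let line := PySem.Str.strip rawLine
        ((if st.2 ≠ some line ∨ line = "" then st.1 ++ [line] else st.1), some line))
      ([], none)
    let p2 := p1.1.foldl (fun (st : List String × Nat) line =>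
        if PySem.Str.strip line = "" then
          let e := st.2 + 1
          ((if e ≤ 2 then st.1 ++ [line] else st.1), e)
        else (st.1 ++ [line], 0))
      ([], 0)
    let cleaned2 := PySem.Str.strip (PySem.Str.join "\n" p2.1)
    "Page Content (Markdown):\n\n" ++ cleaned2

-- ===== PORT B =====
def format_text_context_alt (markdown_content : String) : String :=
  if markdown_content = "" then "Page Content (Markdown):\n\n"
  else
    let lines : List String :=
      (PySem.Chars.splitOn (PySem.Str.strip markdown_content).toList ['\n']).map String.ofList
    let st := lines.foldl (fun (st : List String × Option String × Nat) rawLine =>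
        let line := PySem.Str.strip rawLine
        if line = "" then
          let e := st.2.2 + 1
          ((if e ≤ 2 then st.1 ++ [line] else st.1), some line, e)
        else if st.2.1 = some line then (st.1, some line, st.2.2)
        else (st.1 ++ [line], some line, 0))
      ([], none, 0)
    "Page Content (Markdown):\n\n" ++ PySem.Str.strip (PySem.Str.join "\n" st.1)

-- ===== PRECONDITION & SPEC =====
def Spec_format_text_context (markdown_content : String) (out : String) : Prop := out = format_text_context_alt markdown_content
instance (markdown_content : String) (out : String) : Decidable (Spec_format_text_context markdown_content out) := by unfold Spec_format_text_context; infer_instance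

-- ===== CLAIM (what is proved, stated in full; the proofs are below) =====
def Claim_equal_format_text_context : Prop := ∀ (markdown_content : String), Dom_format_text_context markdown_content → Spec_format_text_context markdown_content (format_text_context markdown_content)

-- ===== LEMMAS AND PROOFS =====

-- A's pass-1 step, pass-2 step and B's fused step, named for the proofs (definitionally the ports' lambdas).
def pvStepA1 (st : List String × Option String) (rawLine : String) : List String × Option String :=
  let line := PySem.Str.strip rawLine
  ((if st.2 ≠ some line ∨ line = "" then st.1 ++ [line] else st.1), some line)

def pvStepA2 (st : List String × Nat) (line : String) : List String × Nat :=
  if PySem.Str.strip line = "" then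
    let e := st.2 + 1
    ((if e ≤ 2 then st.1 ++ [line] else st.1), e)
  else (st.1 ++ [line], 0)

def pvStepB (st : List String × Option String × Nat) (rawLine : String) : List String × Option String × Nat :=
  let line := PySem.Str.strip rawLine
  if line = "" then
    let e := st.2.2 + 1
    ((if e ≤ 2 then st.1 ++ [line] else st.1), some line, e)
  else if st.2.1 = some line then (st.1, some line, st.2.2)
  else (st.1 ++ [line], some line, 0)

def pvLines (m : String) : List String :=
  (PySem.Chars.splitOn (PySem.Str.strip m).toList ['\n']).map String.ofList

lemma strip_head_not_space (l : List Char) (c : Char) (t : List Char)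
    (h : PySem.Chars.strip l = c :: t) : PySem.Chars.isspace c = false := by
  unfold PySem.Chars.strip PySem.Chars.rstrip PySem.Chars.lstrip at h
  have hpre : (List.dropWhile PySem.Chars.isspace
      (List.dropWhile PySem.Chars.isspace l).reverse).reverse <+:
      List.dropWhile PySem.Chars.isspace l := by
    obtain ⟨u, hu⟩ := List.dropWhile_suffix
      (l := (List.dropWhile PySem.Chars.isspace l).reverse) (p := PySem.Chars.isspace)
    exact ⟨u.reverse, by rw [← List.reverse_append, hu, List.reverse_reverse]⟩
  rw [h] at hpre
  obtain ⟨u, hu⟩ := hpre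
  have hid := List.dropWhile_idempotent PySem.Chars.isspace l
  rw [← hu] at hid
  have := List.dropWhile_eq_self_iff.mp hid (by simp)
  simpa using this

lemma strip_idem (l : List Char) : PySem.Chars.strip (PySem.Chars.strip l) = PySem.Chars.strip l := by
  have h1 : PySem.Chars.lstrip (PySem.Chars.strip l) = PySem.Chars.strip l := by
    cases hs : PySem.Chars.strip l with
    | nil => rfl
    | cons c t =>
      have := strip_head_not_space l c t hs
      simp [PySem.Chars.lstrip, this]
  have h2 : (PySem.Chars.strip l).reverse =
      List.dropWhile PySem.Chars.isspace (PySem.Chars.lstrip l).reverse := by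
    simp [PySem.Chars.strip, PySem.Chars.rstrip]
  show PySem.Chars.rstrip (PySem.Chars.lstrip (PySem.Chars.strip l)) = PySem.Chars.strip l
  rw [h1]
  unfold PySem.Chars.rstrip
  rw [h2, List.dropWhile_idempotent, ← h2, List.reverse_reverse]

lemma str_strip_empty : PySem.Str.strip "" = "" := by
  rfl

lemma str_strip_idem (s : String) :
    PySem.Str.strip (PySem.Str.strip s) = PySem.Str.strip s := by
  simp [PySem.Str.strip, String.toList_ofList, strip_idem]

-- pass-1's accumulator factors out
lemma foldA1_acc (rs : List String) (acc : List String) (prev : Option String) :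
    (rs.foldl pvStepA1 (acc, prev)).1 = acc ++ (rs.foldl pvStepA1 ([], prev)).1 := by
  induction rs generalizing acc prev with
  | nil => simp
  | cons r rs ih =>
    simp only [List.foldl_cons, pvStepA1, List.nil_append]
    by_cases h : prev ≠ some (PySem.Str.strip r) ∨ PySem.Str.strip r = ""
    · simp only [if_pos h]
      rw [ih (acc ++ [PySem.Str.strip r]), ih [PySem.Str.strip r]]
      simp
    · simp only [if_neg h]
      exact ih acc _

-- the fused loop computes pass-2 applied to pass-1
lemma fused_eq (rs : List String) (prev : Option String) (out : List String) (ec : Nat) :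
    ((rs.foldl pvStepA1 ([], prev)).1.foldl pvStepA2 (out, ec)).1 =
      (rs.foldl pvStepB (out, prev, ec)).1 := by
  induction rs generalizing prev out ec with
  | nil => simp
  | cons r rs ih =>
    simp only [List.foldl_cons]
    by_cases hline : PySem.Str.strip r = ""
    · have hc : prev ≠ some (PySem.Str.strip r) ∨ PySem.Str.strip r = "" := Or.inr hline
      rw [show pvStepA1 ([], prev) r = ([PySem.Str.strip r], some (PySem.Str.strip r)) by
        simp [pvStepA1, if_pos hc]]
      rw [foldA1_acc rs [PySem.Str.strip r], List.singleton_append, List.foldl_cons]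
      rw [show pvStepA2 (out, ec) (PySem.Str.strip r) =
          ((if ec + 1 ≤ 2 then out ++ [PySem.Str.strip r] else out), ec + 1) by
        simp [pvStepA2, hline, str_strip_empty]]
      rw [show pvStepB (out, prev, ec) r =
          ((if ec + 1 ≤ 2 then out ++ [PySem.Str.strip r] else out), some (PySem.Str.strip r), ec + 1) by
        simp [pvStepB, hline]]
      exact ih _ _ _
    · by_cases hprev : prev = some (PySem.Str.strip r)
      · rw [show pvStepA1 ([], prev) r = ([], some (PySem.Str.strip r)) by
          simp [pvStepA1, hprev, hline]]
        rw [show pvStepB (out, prev, ec) r = (out, some (PySem.Str.strip r), ec) by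
          simp [pvStepB, hline, hprev]]
        exact ih _ _ _
      · have hc : prev ≠ some (PySem.Str.strip r) ∨ PySem.Str.strip r = "" := Or.inl hprev
        rw [show pvStepA1 ([], prev) r = ([PySem.Str.strip r], some (PySem.Str.strip r)) by
          simp [pvStepA1, if_pos hc]]
        rw [foldA1_acc rs [PySem.Str.strip r], List.singleton_append, List.foldl_cons]
        rw [show pvStepA2 (out, ec) (PySem.Str.strip r) = (out ++ [PySem.Str.strip r], 0) by
          simp [pvStepA2, str_strip_idem, hline]]
        rw [show pvStepB (out, prev, ec) r = (out ++ [PySem.Str.strip r], some (PySem.Str.strip r), 0) by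
          simp [pvStepB, hline, hprev]]
        exact ih _ _ _

lemma portA_eq (m : String) (h : ¬ m = "") :
    format_text_context m = "Page Content (Markdown):\n\n" ++
      PySem.Str.strip (PySem.Str.join "\n"
        (((pvLines m).foldl pvStepA1 ([], none)).1.foldl pvStepA2 ([], 0)).1) := by
  unfold format_text_context
  rw [if_neg h]
  rfl

lemma portB_eq (m : String) (h : ¬ m = "") :
    format_text_context_alt m = "Page Content (Markdown):\n\n" ++
      PySem.Str.strip (PySem.Str.join "\n"
        ((pvLines m).foldl pvStepB ([], none, 0)).1) := by
  unfold format_text_context_alt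
  rw [if_neg h]
  rfl

-- ===== VERDICT (by name: the statement is the Claim_ definition above) =====
theorem format_text_context_spec : Claim_equal_format_text_context := by
  intro m _
  unfold Spec_format_text_context
  by_cases h : m = ""
  · simp [format_text_context, format_text_context_alt, h]
  · rw [portA_eq m h, portB_eq m h, fused_eq]
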